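-- pv_equiv track=rewrite | github.com/fit-alessandro-berti/auto-research-agent | scripts/alg0005_stress_tests.py | _input_stats
-- ===== SOURCE A (Python) =====
-- from typing import Any, Callable, Dict, List
--
-- TraceLog = List[List[str]]
--
-- def _input_stats(log: TraceLog) -> Dict[str, int]:
--     activities = {event for trace in log for event in trace}
--     dfg = {(a, b) for trace in log for a, b in zip(trace, trace[1:])}
--     event_count = sum(len(trace) for trace in log)
--     return {
--         "trace_count": len(log),
--         "event_count": event_count,
--         "activity_count": len(activities),
--         "direct_follows_count": len(dfg),
--         "max_trace_length": max((len(trace) for trace in log), default=0),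
--         "deep_soft_budget": 16 * event_count + 12 * len(activities) * len(activities) + 10 * len(dfg) + 120,
--     }
-- ===== SOURCE B (Python) =====
-- from typing import Dict, List
--
-- TraceLog = List[List[str]]
--
-- def _distinct_count(xs):
--     # sort-then-scan: count boundaries between runs of equal elements
--     ys = sorted(xs)
--     if not ys:
--         return 0
--     return 1 + sum(1 for a, b in zip(ys, ys[1:]) if a != b)
--
-- def _input_stats(log: TraceLog) -> Dict[str, int]:
--     events = [event for trace in log for event in trace]
--     follows = [pair for trace in log for pair in zip(trace, trace[1:])]
--     event_count = len(events)
--     activity_count = _distinct_count(events)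
--     dfg_count = _distinct_count(follows)
--     return {
--         "trace_count": len(log),
--         "event_count": event_count,
--         "activity_count": activity_count,
--         "direct_follows_count": dfg_count,
--         "max_trace_length": max((len(trace) for trace in log), default=0),
--         "deep_soft_budget": 16 * event_count + 12 * activity_count * activity_count + 10 * dfg_count + 120,
--     }
-- ===== Notes on version B (the rewrite author's own statement) =====
-- stated objective: alternative
-- what changed: Replaces A's hash-set comprehensions by a sort-then-scan algorithm: the events and the consecutive pairs are flattened into plain lists, each is sorted, and the distinct counts are obtained by counting boundaries between runs of equal adjacent elements; no set is ever built.
import Mathlib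
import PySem

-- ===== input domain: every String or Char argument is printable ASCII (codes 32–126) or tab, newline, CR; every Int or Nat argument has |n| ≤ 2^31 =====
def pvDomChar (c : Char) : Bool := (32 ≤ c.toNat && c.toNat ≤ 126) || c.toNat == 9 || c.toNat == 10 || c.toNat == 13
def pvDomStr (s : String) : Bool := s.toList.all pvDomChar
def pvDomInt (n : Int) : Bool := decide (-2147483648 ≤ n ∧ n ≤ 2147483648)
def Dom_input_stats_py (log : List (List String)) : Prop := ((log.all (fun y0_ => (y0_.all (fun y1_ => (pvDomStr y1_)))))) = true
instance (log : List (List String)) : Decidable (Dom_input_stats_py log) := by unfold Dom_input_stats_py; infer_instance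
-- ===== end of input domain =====

-- B replaces A's hash-set comprehensions by sort-then-scan distinct counting (objective: alternative algorithm, same results).

-- ===== PORT A =====
def input_stats_py (log : List (List String)) : List (String × Int) :=
  let activities : PySem.Set String := PySem.Set.ofList (log.flatMap (fun trace => trace))
  let dfg : PySem.Set (String × String) :=
    PySem.Set.ofList (log.flatMap (fun trace => trace.zip (PySem.List.slice trace (some 1) none)))
  let event_count : Int := (log.map (fun trace => (trace.length : Int))).sum
  [("trace_count", (log.length : Int)),
   ("event_count", event_count),
   ("activity_count", PySem.Set.len activities),
   ("direct_follows_count", PySem.Set.len dfg),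
   ("max_trace_length", PySem.List.maxD (log.map (fun trace => (trace.length : Int))) (fun x => x) 0),
   ("deep_soft_budget", 16 * event_count + 12 * PySem.Set.len activities * PySem.Set.len activities
      + 10 * PySem.Set.len dfg + 120)]

-- ===== PORT B =====
-- scan part of _distinct_count: ys is already sorted; count 1 + the boundaries between unequal neighbours
def pvAdjCount {α : Type} [DecidableEq α] (ys : List α) : Int :=
  match ys with
  | [] => 0
  | _ :: _ =>
    1 + (ys.zip (PySem.List.slice ys (some 1) none)).foldl
          (fun acc p => if p.1 ≠ p.2 then acc + 1 else acc) 0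

def input_stats_py_alt (log : List (List String)) : List (String × Int) :=
  let events := log.flatMap (fun trace => trace)
  let follows := log.flatMap (fun trace => trace.zip (PySem.List.slice trace (some 1) none))
  let event_count : Int := events.length
  -- _distinct_count(events): sorted(list of strings), then the adjacent scan
  let activity_count := pvAdjCount (PySem.List.sorted events (fun x => x) false)
  -- _distinct_count(follows): Python sorts the tuples lexicographically = sorted2 with fst/snd keys
  let dfg_count := pvAdjCount (PySem.List.sorted2 follows Prod.fst Prod.snd false)
  [("trace_count", (log.length : Int)),
   ("event_count", event_count),
   ("activity_count", activity_count),
   ("direct_follows_count", dfg_count),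
   ("max_trace_length", PySem.List.maxD (log.map (fun trace => (trace.length : Int))) (fun x => x) 0),
   ("deep_soft_budget", 16 * event_count + 12 * activity_count * activity_count + 10 * dfg_count + 120)]

-- ===== PRECONDITION & SPEC =====
def Spec_input_stats_py (log : List (List String)) (out : List (String × Int)) : Prop := out = input_stats_py_alt log
instance (log : List (List String)) (out : List (String × Int)) : Decidable (Spec_input_stats_py log out) := by unfold Spec_input_stats_py; infer_instance

-- ===== CLAIM (what is proved, stated in full; the proofs are below) =====
def Claim_equal_input_stats_py : Prop := ∀ (log : List (List String)), Dom_input_stats_py log → Spec_input_stats_py log (input_stats_py log)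

-- ===== LEMMAS AND PROOFS =====

-- inserting into a le-sorted list keeps it le-sorted, for any comparator compatible with le
theorem pv_insertBy_pairwise {α : Type} (before : α → α → Bool) (le : α → α → Prop)
    (h1 : ∀ a b, before a b = true → le a b) (h2 : ∀ a b, before a b = false → le b a)
    (htr : ∀ a b c, le a b → le b c → le a c)
    (x : α) (ys : List α) (hys : ys.Pairwise le) :
    (PySem.List.insertBy before x ys).Pairwise le := by
  induction ys with
  | nil => simp [PySem.List.insertBy]
  | cons y t ih =>
    rcases List.pairwise_cons.mp hys with ⟨hy, ht⟩
    by_cases hb : before x y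
    · simp only [PySem.List.insertBy, hb, if_true]
      refine List.pairwise_cons.mpr ⟨?_, hys⟩
      intro z hz
      rcases List.mem_cons.mp hz with rfl | hz
      · exact h1 _ _ hb
      · exact htr _ _ _ (h1 _ _ hb) (hy _ hz)
    · simp only [PySem.List.insertBy, hb]
      refine List.pairwise_cons.mpr ⟨?_, ih ht⟩
      intro z hz
      rcases (PySem.List.mem_insertBy before x z t).mp hz with rfl | hz
      · exact h2 _ _ (Bool.eq_false_iff.mpr hb ▸ rfl)
      · exact hy _ hz

theorem pv_foldl_insertBy_pairwise {α : Type} (before : α → α → Bool) (le : α → α → Prop)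
    (h1 : ∀ a b, before a b = true → le a b) (h2 : ∀ a b, before a b = false → le b a)
    (htr : ∀ a b c, le a b → le b c → le a c) :
    ∀ (xs acc : List α), acc.Pairwise le →
      (xs.foldl (fun acc x => PySem.List.insertBy before x acc) acc).Pairwise le := by
  intro xs
  induction xs with
  | nil => intro acc h; simpa using h
  | cons x t ih =>
    intro acc h
    exact ih _ (pv_insertBy_pairwise before le h1 h2 htr x acc h)

-- Python's lexicographic ≤ on string pairs
def pvLexLe (a b : String × String) : Prop := a.1 < b.1 ∨ (a.1 = b.1 ∧ a.2 ≤ b.2)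

theorem pvLexLe_trans (a b c : String × String) (h1 : pvLexLe a b) (h2 : pvLexLe b c) : pvLexLe a c := by
  rcases h1 with h1 | ⟨e1, l1⟩ <;> rcases h2 with h2 | ⟨e2, l2⟩
  · exact Or.inl (lt_trans h1 h2)
  · exact Or.inl (e2 ▸ h1)
  · exact Or.inl (e1 ▸ h2)
  · exact Or.inr ⟨e1.trans e2, le_trans l1 l2⟩

theorem pvLexLe_antisymm (a b : String × String) (h1 : pvLexLe a b) (h2 : pvLexLe b a) : a = b := by
  rcases h1 with h1 | ⟨e1, l1⟩ <;> rcases h2 with h2 | ⟨e2, l2⟩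
  · exact absurd h2 (lt_asymm h1)
  · exact absurd h1 (e2 ▸ lt_irrefl _)
  · exact absurd h2 (e1 ▸ lt_irrefl _)
  · exact Prod.ext e1 (le_antisymm l1 l2)

theorem pv_sorted2_pairwise (xs : List (String × String)) :
    (PySem.List.sorted2 xs Prod.fst Prod.snd false).Pairwise pvLexLe := by
  have hdef : PySem.List.sorted2 xs Prod.fst Prod.snd false
      = xs.foldl (fun acc x => PySem.List.insertBy
          (fun a b => decide (a.1 < b.1) || (!decide (b.1 < a.1) && decide (a.2 < b.2))) x acc) [] := rfl
  rw [hdef]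
  apply pv_foldl_insertBy_pairwise _ pvLexLe ?h1 ?h2 pvLexLe_trans _ _ (List.Pairwise.nil)
  case h1 =>
    intro a b h
    by_cases c1 : a.1 < b.1
    · exact Or.inl c1
    · have h' : ¬ (b.1 < a.1) ∧ a.2 < b.2 := by
        by_cases c2 : b.1 < a.1
        · simp [c1, c2] at h
        · by_cases c3 : a.2 < b.2
          · exact ⟨c2, c3⟩
          · simp [c1, c2, c3] at h
      exact Or.inr ⟨le_antisymm (not_lt.mp h'.1) (not_lt.mp c1), le_of_lt h'.2⟩
  case h2 =>
    intro a b h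
    have h' : ¬ (a.1 < b.1) ∧ (b.1 < a.1 ∨ ¬ (a.2 < b.2)) := by
      by_cases c1 : a.1 < b.1
      · simp [c1] at h
      · by_cases c2 : b.1 < a.1
        · exact ⟨c1, Or.inl c2⟩
        · by_cases c3 : a.2 < b.2
          · simp [c1, c2, c3] at h
          · exact ⟨c1, Or.inr c3⟩
    rcases (not_lt.mp h'.1).lt_or_eq with hlt | heq
    · exact Or.inl hlt
    · rcases h'.2 with h2 | h2
      · exact Or.inl h2
      · exact Or.inr ⟨heq, not_lt.mp h2⟩

-- on a le-sorted nonempty list, 1 + the number of unequal adjacent pairs is the number of distinct elements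
theorem pv_adj_card {α : Type} [DecidableEq α] (le : α → α → Prop)
    (hanti : ∀ a b, le a b → le b a → a = b) :
    ∀ (t : List α) (x : α), (x :: t).Pairwise le →
      1 + ((((x :: t).zip t).countP (fun p => decide (p.1 ≠ p.2))) : Int)
        = ((x :: t).toFinset.card : Int) := by
  intro t
  induction t with
  | nil => intro x _; simp
  | cons y r ih =>
    intro x hp
    rcases List.pairwise_cons.mp hp with ⟨hx, hyr⟩
    have hzip : (x :: y :: r).zip (y :: r) = (x, y) :: ((y :: r).zip r) := rfl
    by_cases hxy : x = y
    · subst hxy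
      have hih := ih x hyr
      rw [hzip]
      simp only [List.countP_cons, List.toFinset_cons, Finset.insert_idem] at *
      simp at *
      omega
    · have hxnot : x ∉ (y :: r) := by
        intro hmem
        rcases List.mem_cons.mp hmem with rfl | hmem
        · exact hxy rfl
        · rcases List.pairwise_cons.mp hyr with ⟨hy, _⟩
          exact hxy (hanti _ _ (hx _ (by simp)) (hy _ hmem))
      have hih := ih y hyr
      rw [hzip]
      have hcard : (x :: y :: r).toFinset.card = 1 + (y :: r).toFinset.card := by
        rw [List.toFinset_cons, Finset.card_insert_of_notMem (by simpa using hxnot)]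
        omega
      simp only [List.countP_cons, hcard] at *
      simp [hxy] at *
      omega

theorem pvAdjCount_card {α : Type} [DecidableEq α] (le : α → α → Prop)
    (hanti : ∀ a b, le a b → le b a → a = b)
    (ys : List α) (hp : ys.Pairwise le) :
    pvAdjCount ys = (ys.toFinset.card : Int) := by
  cases ys with
  | nil => simp [pvAdjCount]
  | cons x t =>
    have hslice : PySem.List.slice (x :: t) (some 1) none = t := by
      have h := PySem.List.slice_from (x :: t) (a := 1) (by norm_num)
      rw [h]
      rfl
    simp only [pvAdjCount, hslice, PySem.List.foldl_ite_add_one, zero_add]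
    exact pv_adj_card le hanti t x hp

-- A's set cardinality as a Finset cardinality
theorem pv_setlen_toFinset {α : Type} [BEq α] [LawfulBEq α] [DecidableEq α] (xs : List α) :
    PySem.Set.len (PySem.Set.ofList xs) = (xs.toFinset.card : Int) := by
  have h1 : (PySem.Set.ofList xs).toFinset = xs.toFinset := by
    ext a; simp [PySem.Set.mem_ofList]
  have h2 : (PySem.Set.ofList xs).toFinset.card = (PySem.Set.ofList xs).length :=
    List.toFinset_card_of_nodup (PySem.Set.nodup_ofList xs)
  simp only [PySem.Set.len, ← h1, h2]

-- sum of the trace lengths = length of the flattened event list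
theorem pv_event_count (log : List (List String)) :
    (log.map (fun trace => (trace.length : Int))).sum
      = ((log.flatMap (fun trace => trace)).length : Int) := by
  induction log with
  | nil => simp
  | cons t rest ih =>
    simp only [List.map_cons, List.sum_cons, List.flatMap_cons, List.length_append, ih]
    push_cast
    ring

-- the two distinct counts agree
theorem pv_act_eq (xs : List String) :
    PySem.Set.len (PySem.Set.ofList xs)
      = pvAdjCount (PySem.List.sorted xs (fun x => x) false) := by
  rw [pv_setlen_toFinset,
      pvAdjCount_card (le := fun a b : String => a ≤ b)
        (fun _ _ => le_antisymm) _
        (by simpa using PySem.List.sorted_pairwise xs (fun x => x)),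
      List.toFinset_eq_of_perm _ _ (PySem.List.sorted_perm xs (fun x => x) false)]

theorem pv_dfg_eq (xs : List (String × String)) :
    PySem.Set.len (PySem.Set.ofList xs)
      = pvAdjCount (PySem.List.sorted2 xs Prod.fst Prod.snd false) := by
  rw [pv_setlen_toFinset,
      pvAdjCount_card (le := pvLexLe) pvLexLe_antisymm _
        (pv_sorted2_pairwise xs),
      List.toFinset_eq_of_perm _ _ (PySem.List.sorted2_perm xs Prod.fst Prod.snd false)]

-- ===== VERDICT (by name: the statement is the Claim_ definition above) =====
theorem input_stats_py_spec : Claim_equal_input_stats_py := by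
  intro log _
  unfold Spec_input_stats_py input_stats_py input_stats_py_alt
  simp only [pv_event_count, pv_act_eq, pv_dfg_eq]
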